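-- pv_equiv track=rewrite | github.com/sjunkim95/project1 | part2.py | question4
-- ===== SOURCE A (Python) =====
-- def question4(n: list) -> list:
--
--     my_dict = {}
--
--     for i in range(len(n)):
--         for j in range(len(n[i])):
--             if n[i][j] not in my_dict:
--                 my_dict[n[i][j]] = 1
--             else:
--                 my_dict[n[i][j]] += 1
--
--     my_list = []
--
--     for i in my_dict.keys():
--         if my_dict[i] > 1:
--             my_list.append(i)
--
--     return my_list
--
--     return my_list
-- ===== SOURCE B (Python) =====
-- def question4(n: list) -> list:
--     seen = set()
--     dups = set()
--     for row in n:
--         for x in row: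
--             if x in seen:
--                 dups.add(x)
--             else:
--                 seen.add(x)
--     result = []
--     added = set()
--     for row in n:
--         for x in row:
--             if x in dups and x not in added:
--                 result.append(x)
--                 added.add(x)
--     return result
-- ===== Notes on version B (the rewrite author's own statement) =====
-- stated objective: alternative
-- what changed: Replaces A's count dict (built by index loops and then filtered by iterating its keys) with two set-based passes over the elements themselves: pass one builds seen/dups sets, pass two re-scans all elements and emits each duplicate at its first occurrence.
import Mathlib
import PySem

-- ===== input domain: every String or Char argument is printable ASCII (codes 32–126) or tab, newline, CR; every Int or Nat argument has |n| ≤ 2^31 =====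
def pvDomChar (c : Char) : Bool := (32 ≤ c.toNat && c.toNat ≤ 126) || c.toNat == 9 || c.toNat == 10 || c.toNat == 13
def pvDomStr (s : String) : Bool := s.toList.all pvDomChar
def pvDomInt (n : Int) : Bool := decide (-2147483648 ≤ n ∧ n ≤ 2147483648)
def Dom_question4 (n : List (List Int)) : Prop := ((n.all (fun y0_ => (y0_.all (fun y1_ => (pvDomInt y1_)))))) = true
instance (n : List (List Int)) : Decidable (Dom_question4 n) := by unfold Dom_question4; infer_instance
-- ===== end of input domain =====

-- B replaces A's count dict and dict-key output loop with two set-based passes over the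
-- elements themselves (seen/dups, then first-occurrence emission); alternative algorithm, same cost.

-- ===== PORT A =====
-- the nested index loops building my_dict
def q4Count (n : List (List Int)) : PySem.Dict Int Int :=
  (PySem.List.pyRange 0 (n.length : Int) 1).foldl
    (fun d i =>
      (PySem.List.pyRange 0 ((PySem.List.pyGetD n i []).length : Int) 1).foldl
        (fun d j =>
          if !(d.contains (PySem.List.pyGetD (PySem.List.pyGetD n i []) j 0)) then
            d.insert (PySem.List.pyGetD (PySem.List.pyGetD n i []) j 0) 1
          else
            d.insert (PySem.List.pyGetD (PySem.List.pyGetD n i []) j 0)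
              (d.getD (PySem.List.pyGetD (PySem.List.pyGetD n i []) j 0) 0 + 1))
        d)
    (PySem.Dict.empty : PySem.Dict Int Int)

def question4 (n : List (List Int)) : List Int :=
  let my_dict := q4Count n
  my_dict.keys.foldl (fun my_list i => if my_dict.getD i 0 > 1 then my_list ++ [i] else my_list) []

-- ===== PORT B =====
-- pass 1 step: record x in `dups` when already seen, else in `seen`
def q4StepSeen (sd : PySem.Set Int × PySem.Set Int) (x : Int) : PySem.Set Int × PySem.Set Int :=
  if PySem.Set.contains sd.1 x then (sd.1, PySem.Set.add sd.2 x) else (PySem.Set.add sd.1 x, sd.2)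

-- pass 2 step: emit x the first time it is met while being a duplicate
def q4StepEmit (dups : PySem.Set Int) (ra : List Int × PySem.Set Int) (x : Int) :
    List Int × PySem.Set Int :=
  if PySem.Set.contains dups x && !(PySem.Set.contains ra.2 x) then
    (ra.1 ++ [x], PySem.Set.add ra.2 x)
  else ra

def q4Dups (n : List (List Int)) : PySem.Set Int :=
  (n.foldl (fun sd row => row.foldl q4StepSeen sd)
    ((PySem.Set.empty : PySem.Set Int), (PySem.Set.empty : PySem.Set Int))).2

def question4_alt (n : List (List Int)) : List Int :=
  let dups := q4Dups n
  (n.foldl (fun ra row => row.foldl (q4StepEmit dups) ra)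
      (([] : List Int), (PySem.Set.empty : PySem.Set Int))).1

-- ===== PRECONDITION & SPEC =====
def Spec_question4 (n : List (List Int)) (out : List Int) : Prop := out = question4_alt n
instance (n : List (List Int)) (out : List Int) : Decidable (Spec_question4 n out) := by unfold Spec_question4; infer_instance

-- ===== CLAIM (what is proved, stated in full; the proofs are below) =====
def Claim_equal_question4 : Prop := ∀ (n : List (List Int)), Dom_question4 n → Spec_question4 n (question4 n)

-- ===== LEMMAS AND PROOFS =====

-- nested index loops over a list of lists are a fold over flatten
lemma nested_pyrange {β : Type} (n : List (List Int)) (f : β → Int → β) (init : β) :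
    (PySem.List.pyRange 0 (n.length : Int) 1).foldl
      (fun acc i =>
        (PySem.List.pyRange 0 ((PySem.List.pyGetD n i []).length : Int) 1).foldl
          (fun acc j => f acc (PySem.List.pyGetD (PySem.List.pyGetD n i []) j 0)) acc) init
    = n.flatten.foldl f init := by
  rw [show (fun (acc : β) (i : Int) =>
        (PySem.List.pyRange 0 ((PySem.List.pyGetD n i []).length : Int) 1).foldl
          (fun acc j => f acc (PySem.List.pyGetD (PySem.List.pyGetD n i []) j 0)) acc)
      = fun acc i => (PySem.List.pyGetD n i []).foldl f acc from by
    funext acc i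
    exact PySem.List.foldl_pyRange_zero_pyGetD' (PySem.List.pyGetD n i []) 0 f acc]
  exact (PySem.List.foldl_pyRange_zero_pyGetD' n [] (fun acc row => row.foldl f acc) init).trans
    List.foldl_flatten.symm

-- A's counting step is the Counter step
lemma q4_stepA_eq :
    (fun (d : PySem.Dict Int Int) (x : Int) =>
        if !(d.contains x) then d.insert x 1 else d.insert x (d.getD x 0 + 1)) =
    fun (d : PySem.Dict Int Int) (x : Int) => d.insert x (d.getD x 0 + 1) := by
  funext d x
  by_cases h : d.contains x = true
  · simp [h]
  · have h' : d.contains x = false := by simpa using h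
    simp [h', PySem.Dict.getD_of_not_contains d 0 h']

-- A's my_dict is Counter(flatten)
lemma q4Count_eq (n : List (List Int)) : q4Count n = PySem.Dict.counter n.flatten := by
  have h := nested_pyrange n
    (fun d x => if !(d.contains x) then d.insert x 1 else d.insert x (d.getD x 0 + 1))
    (PySem.Dict.empty : PySem.Dict Int Int)
  rw [q4_stepA_eq] at h
  exact h.trans (PySem.Dict.foldl_insert_getD_add_one_eq_counter n.flatten)

-- A computes: first occurrences of flatten, filtered by count > 1
lemma q4_A_char (n : List (List Int)) :
    question4 n = (PySem.Set.ofList n.flatten).filter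
      (fun k => decide ((1 : Int) < (n.flatten.count k : Nat))) := by
  show (q4Count n).keys.foldl
      (fun my_list i => if (q4Count n).getD i 0 > 1 then my_list ++ [i] else my_list) [] = _
  rw [q4Count_eq]
  rw [show (fun (my_list : List Int) (i : Int) =>
        if (PySem.Dict.counter n.flatten).getD i 0 > 1 then my_list ++ [i] else my_list) =
      (fun my_list i =>
        if (decide ((1 : Int) < (PySem.Dict.counter n.flatten).getD i 0)) = true then
          my_list ++ [id i] else my_list) from by
    funext a b; simp]
  rw [PySem.List.foldl_append_if, PySem.Dict.keys_counter]
  simp [PySem.Dict.getD_counter]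

-- membership in the `dups` set after B's first pass
lemma q4_pass1_mem (xs : List Int) : ∀ (seen dups : PySem.Set Int) (y : Int),
    y ∈ (xs.foldl q4StepSeen (seen, dups)).2 ↔
      y ∈ dups ∨ (y ∈ xs ∧ y ∈ seen) ∨ 2 ≤ xs.count y := by
  induction xs with
  | nil => simp
  | cons x xs ih =>
    intro seen dups y
    simp only [List.foldl_cons, List.mem_cons]
    by_cases hx : PySem.Set.contains seen x = true
    · have hxs : x ∈ seen := (PySem.Set.contains_iff seen x).mp hx
      rw [show q4StepSeen (seen, dups) x = (seen, PySem.Set.add dups x) from by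
        unfold q4StepSeen; rw [if_pos hx]]
      rw [ih, PySem.Set.mem_add]
      by_cases hyx : y = x
      · subst hyx
        exact iff_of_true (Or.inl (Or.inr rfl)) (Or.inr (Or.inl ⟨Or.inl rfl, hxs⟩))
      · rw [List.count_cons_of_ne (Ne.symm hyx)]
        tauto
    · have hxs : x ∉ seen := fun h => hx ((PySem.Set.contains_iff seen x).mpr h)
      rw [show q4StepSeen (seen, dups) x = (PySem.Set.add seen x, dups) from by
        unfold q4StepSeen; rw [if_neg hx]]
      rw [ih, PySem.Set.mem_add]
      by_cases hyx : y = x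
      · subst hyx
        have hcx : y ∈ xs ↔ 1 ≤ xs.count y := by rw [← List.count_pos_iff]; omega
        rw [List.count_cons_self]
        constructor
        · rintro (h | ⟨h1, _⟩ | h)
          · exact Or.inl h
          · have := hcx.mp h1; right; right; omega
          · right; right; omega
        · rintro (h | ⟨_, h2⟩ | h)
          · exact Or.inl h
          · exact absurd h2 hxs
          · rcases Nat.lt_or_ge (xs.count y) 2 with hlt | hge
            · exact Or.inr (Or.inl ⟨hcx.mpr (by omega), Or.inr rfl⟩)
            · exact Or.inr (Or.inr hge)
      · rw [List.count_cons_of_ne (Ne.symm hyx)]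
        tauto

-- B's second pass appends, after `res`, the first occurrences that pass the guard
lemma q4_pass2 (dups : PySem.Set Int) (xs : List Int) :
    ∀ (res : List Int) (added : PySem.Set Int),
    (xs.foldl (q4StepEmit dups) (res, added)).1 =
      res ++ (PySem.Set.ofList xs).filter
        (fun y => PySem.Set.contains dups y && !(PySem.Set.contains added y)) := by
  induction xs with
  | nil => simp
  | cons x xs ih =>
    intro res added
    simp only [List.foldl_cons, PySem.Set.ofList_cons, List.filter_cons]
    by_cases hg : (PySem.Set.contains dups x && !(PySem.Set.contains added x)) = true
    · rw [show q4StepEmit dups (res, added) x = (res ++ [x], PySem.Set.add added x) from by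
        unfold q4StepEmit; rw [if_pos hg]]
      rw [ih, if_pos hg]
      simp only [PySem.Set.discard, List.filter_filter, List.append_assoc,
        List.singleton_append]
      congr 2
      apply List.filter_congr
      intro y _
      by_cases hyx : y = x
      · subst hyx
        have h1 : PySem.Set.contains (PySem.Set.add added y) y = true :=
          (PySem.Set.contains_iff _ y).mpr ((PySem.Set.mem_add added y y).mpr (Or.inr rfl))
        simp only [h1, beq_self_eq_true, Bool.not_true, Bool.and_false]
      · have e1 : PySem.Set.contains (PySem.Set.add added x) y =
            PySem.Set.contains added y := by
          by_cases hy : y ∈ added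
          · rw [(PySem.Set.contains_iff _ y).mpr ((PySem.Set.mem_add added x y).mpr (Or.inl hy)),
              (PySem.Set.contains_iff _ y).mpr hy]
          · have h1 : y ∉ PySem.Set.add added x := fun h =>
              ((PySem.Set.mem_add added x y).mp h).elim hy hyx
            rw [Bool.eq_false_iff.mpr (fun hc => h1 ((PySem.Set.contains_iff _ y).mp hc)),
              Bool.eq_false_iff.mpr (fun hc => hy ((PySem.Set.contains_iff _ y).mp hc))]
        have hbx : (y == x) = false := beq_eq_false_iff_ne.mpr hyx
        simp only [e1, hbx, Bool.not_false, Bool.and_true]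
    · rw [show q4StepEmit dups (res, added) x = (res, added) from by
        unfold q4StepEmit; rw [if_neg hg]]
      rw [ih, if_neg hg]
      simp only [PySem.Set.discard, List.filter_filter]
      congr 1
      apply List.filter_congr
      intro y _
      have hpx : (PySem.Set.contains dups x && !(PySem.Set.contains added x)) = false :=
        Bool.eq_false_iff.mpr hg
      by_cases hyx : y = x
      · subst hyx
        simp only [beq_self_eq_true, Bool.not_true, Bool.and_false]
        exact hpx
      · have hbx : (y == x) = false := beq_eq_false_iff_ne.mpr hyx
        simp only [hbx, Bool.not_false, Bool.and_true]

-- the dups set tests exactly "count ≥ 2 in flatten"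
lemma q4Dups_contains (n : List (List Int)) (y : Int) :
    PySem.Set.contains (q4Dups n) y = decide (2 ≤ n.flatten.count y) := by
  unfold q4Dups
  rw [← List.foldl_flatten]
  have h1 := q4_pass1_mem n.flatten PySem.Set.empty PySem.Set.empty y
  by_cases h : 2 ≤ n.flatten.count y
  · simp only [h, decide_true]
    exact (PySem.Set.contains_iff _ y).mpr (h1.mpr (Or.inr (Or.inr h)))
  · simp only [h, decide_false]
    by_contra hc
    have hmem := (PySem.Set.contains_iff _ y).mp (by simpa using hc)
    have := h1.mp hmem
    simp [PySem.Set.empty] at this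
    omega

-- ===== VERDICT (by name: the statement is the Claim_ definition above) =====
theorem question4_spec : Claim_equal_question4 := by
  intro n _
  unfold Spec_question4
  rw [q4_A_char]
  show _ = (n.foldl (fun ra row => row.foldl (q4StepEmit (q4Dups n)) ra)
      (([] : List Int), (PySem.Set.empty : PySem.Set Int))).1
  rw [← List.foldl_flatten, q4_pass2]
  simp only [List.nil_append]
  apply List.filter_congr
  intro y _
  rw [q4Dups_contains,
    show PySem.Set.contains (PySem.Set.empty : PySem.Set Int) y = false from rfl]
  simp only [Bool.not_false, Bool.and_true]
  rw [decide_eq_decide]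
  omega
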